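-- pv_equiv track=rewrite | github.com/tofulim/algorithm_study | algorithm/programers/mine_digging.py | get_part_costs
-- ===== SOURCE A (Python) =====
-- pick2cost = {
--     0: {"diamond": 1, "iron": 1, "stone": 1},
--     1: {"diamond": 5, "iron": 1, "stone": 1},
--     2: {"diamond": 25, "iron": 5, "stone": 1},
-- }
--
-- def get_part_costs(minerals, picks):
--     num_picks = sum(picks)
--     part_len = len(minerals) // 5 if len(minerals) % 5 == 0 else (len(minerals) // 5) + 1
--     part_costs = {i: 0 for i in range(part_len)}
--
--     part_cost = 0
--     for idx, mineral in enumerate(minerals[:num_picks * 5]):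
--         part_costs[idx // 5] += pick2cost[2][mineral]
--
--     return part_costs
-- ===== SOURCE B (Python) =====
-- pick2cost = {
--     0: {"diamond": 1, "iron": 1, "stone": 1},
--     1: {"diamond": 5, "iron": 1, "stone": 1},
--     2: {"diamond": 25, "iron": 5, "stone": 1},
-- }
--
-- def get_part_costs(minerals, picks):
--     cost = pick2cost[2]
--     part_len = -(-len(minerals) // 5)
--     sliced = minerals[:sum(picks) * 5]
--     return {i: sum(cost[m] for m in sliced[5 * i:5 * i + 5]) for i in range(part_len)}
-- ===== Notes on version B (the rewrite author's own statement) =====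
-- stated objective: simpler
-- what changed: Replaces A's flat per-mineral enumerate-fold that increments a pre-seeded zero dict at key idx//5 with a per-group decomposition: group count by ceiling division and a dict comprehension that sums the diamond-pick cost of each 5-element chunk of the sliced prefix.
import Mathlib
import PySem

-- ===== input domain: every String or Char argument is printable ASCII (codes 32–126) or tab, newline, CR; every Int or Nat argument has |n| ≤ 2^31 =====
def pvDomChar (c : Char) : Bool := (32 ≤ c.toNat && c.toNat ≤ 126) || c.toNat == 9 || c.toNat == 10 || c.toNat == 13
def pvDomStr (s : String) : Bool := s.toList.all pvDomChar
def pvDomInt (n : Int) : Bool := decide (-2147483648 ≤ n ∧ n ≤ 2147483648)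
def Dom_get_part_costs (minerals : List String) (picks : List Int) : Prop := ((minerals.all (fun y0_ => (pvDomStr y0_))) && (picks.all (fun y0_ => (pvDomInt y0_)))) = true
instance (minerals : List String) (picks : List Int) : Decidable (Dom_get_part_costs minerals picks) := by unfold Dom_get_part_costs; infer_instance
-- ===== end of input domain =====

-- B replaces A's flat per-mineral fold into a pre-seeded dict with a per-group chunk-and-sum
-- dict comprehension (objective: simpler). Equivalence is about the return value.

-- ===== PORT A =====
-- Python module constant pick2cost: both programs only read row 2 (the diamond pick).
def pick2cost2 : PySem.Dict String Int :=
  PySem.Dict.ofList [("diamond", 25), ("iron", 5), ("stone", 1)]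

def get_part_costs (minerals : List String) (picks : List Int) : List (Int × Int) :=
  let num_picks : Int := picks.sum
  let mlen : Int := (minerals.length : Int)
  let part_len : Int :=
    if PySem.Int.mod mlen 5 = 0 then PySem.Int.floordiv mlen 5 else PySem.Int.floordiv mlen 5 + 1
  let part_costs : PySem.Dict Int Int :=
    (PySem.List.pyRange 0 part_len 1).foldl (fun d i => d.insert i 0) PySem.Dict.empty
  let final : PySem.Dict Int Int :=
    (PySem.List.enumerate (PySem.List.slice minerals none (some (num_picks * 5))) 0).foldl
      (fun d p => d.modify (PySem.Int.floordiv p.1 5) 0 (fun v => v + pick2cost2.getD p.2 0))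
      part_costs
  final.items

-- ===== PORT B =====
def get_part_costs_alt (minerals : List String) (picks : List Int) : List (Int × Int) :=
  let part_len : Int := -(PySem.Int.floordiv (-((minerals.length : Nat) : Int)) 5)
  let sliced : List String := PySem.List.slice minerals none (some (picks.sum * 5))
  ((PySem.List.pyRange 0 part_len 1).foldl
      (fun d i => d.insert i
        (((PySem.List.slice sliced (some (5 * i)) (some (5 * i + 5))).map
            (fun m => pick2cost2.getD m 0)).sum))
      PySem.Dict.empty).items

-- ===== PRECONDITION & SPEC =====
-- Pre_ excludes exactly the inputs on which some mineral in the consumed prefix minerals[:sum(picks)*5]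
-- is not a key of pick2cost[2]: there the Python A raises KeyError (and so does B).
def Pre_get_part_costs (minerals : List String) (picks : List Int) : Prop :=
  ∀ m ∈ PySem.List.slice minerals none (some (picks.sum * 5)),
    m = "diamond" ∨ m = "iron" ∨ m = "stone"
instance (minerals : List String) (picks : List Int) : Decidable (Pre_get_part_costs minerals picks) := by
  unfold Pre_get_part_costs; infer_instance

def pvWitness_get_part_costs : List String × List Int :=
  (["diamond", "stone", "iron"], [1])

def Spec_get_part_costs (minerals : List String) (picks : List Int) (out : List (Int × Int)) : Prop := out = get_part_costs_alt minerals picks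
instance (minerals : List String) (picks : List Int) (out : List (Int × Int)) : Decidable (Spec_get_part_costs minerals picks out) := by unfold Spec_get_part_costs; infer_instance

-- ===== CLAIM (what is proved, stated in full; the proofs are below) =====
def Claim_equal_get_part_costs : Prop := ∀ (minerals : List String) (picks : List Int), Dom_get_part_costs minerals picks → Pre_get_part_costs minerals picks → Spec_get_part_costs minerals picks (get_part_costs minerals picks)

-- ===== LEMMAS AND PROOFS =====

-- cost sum of the k-th 5-chunk of S
def pvCsum (S : List String) (k : Nat) : Int :=
  (((S.drop (5 * k)).take 5).map (fun m => pick2cost2.getD m 0)).sum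

theorem pvSlice_length_le {α : Type} (xs : List α) (a? b? : Option Int) :
    (PySem.List.slice xs a? b?).length ≤ xs.length := by
  simp only [PySem.List.slice]
  rw [List.length_take, List.length_drop]
  omega

theorem pvCsum_append_lt (S : List String) (m : String) (k : Nat)
    (h : 5 * k + 5 ≤ S.length) : pvCsum (S ++ [m]) k = pvCsum S k := by
  unfold pvCsum
  rw [List.drop_append_of_le_length (by omega), List.take_append_of_le_length (by simp; omega)]

theorem pvCsum_append_gt (S : List String) (m : String) (k : Nat)
    (h : S.length + 1 ≤ 5 * k) : pvCsum (S ++ [m]) k = pvCsum S k := by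
  unfold pvCsum
  rw [List.drop_eq_nil_of_le (by simp; omega), List.drop_eq_nil_of_le (by omega)]

theorem pvCsum_append_eq (S : List String) (m : String) (k : Nat)
    (h1 : 5 * k ≤ S.length) (h2 : S.length < 5 * k + 5) :
    pvCsum (S ++ [m]) k = pvCsum S k + pick2cost2.getD m 0 := by
  unfold pvCsum
  rw [List.drop_append_of_le_length h1,
      List.take_of_length_le (l := S.drop (5 * k) ++ [m]) (by simp; omega),
      List.take_of_length_le (l := S.drop (5 * k)) (by simp; omega)]
  simp

theorem pvFoldA (P : Nat) (S : List String) (hS : S.length ≤ 5 * P) :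
    (PySem.List.enumerate S 0).foldl
      (fun d p => d.modify (PySem.Int.floordiv p.1 5) 0 (fun v => v + pick2cost2.getD p.2 0))
      ((PySem.List.pyRange 0 ((P : Nat) : Int) 1).foldl (fun d i => d.insert i 0) PySem.Dict.empty)
    = PySem.Dict.mk ((List.range P).map (fun (k : Nat) => ((k : Int), pvCsum S k))) := by
  induction S using List.reverseRecOn with
  | nil =>
      simp only [PySem.List.enumerate_nil, List.foldl_nil]
      apply PySem.Dict.ext
      rw [PySem.Dict.items_foldl_insert_fresh _ (fun i => i) _ _
            (by intro a _; simp [PySem.Dict.contains_empty])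
            (by simpa using PySem.List.nodup_pyRange_one 0 ((P : Nat) : Int))]
      rw [PySem.List.pyRange_zero_natCast, List.map_map]
      simp [pvCsum, PySem.Dict.empty, Function.comp]
  | append_singleton S m ih =>
      have hlen : S.length + 1 ≤ 5 * P := by simpa using hS
      rw [PySem.List.enumerate_append, List.foldl_append, ih (by omega)]
      simp only [PySem.List.enumerate_cons, PySem.List.enumerate_nil, List.foldl_cons, List.foldl_nil]
      set q : Nat := S.length / 5 with hq
      have hqP : q < P := by omega
      have hkey : PySem.Int.floordiv ((0 : Int) + (S.length : Int)) 5 = ((q : Nat) : Int) := by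
        rw [zero_add]; exact_mod_cast PySem.Int.floordiv_natCast S.length 5
      have hndk : (PySem.Dict.mk ((List.range P).map (fun (k : Nat) => ((k : Int), pvCsum S k)))).keys.Nodup := by
        simp only [PySem.Dict.keys, List.map_map]
        exact List.nodup_range.map (fun a b h => by simpa using h)
      have hmem : (((q : Nat) : Int), pvCsum S q) ∈
          ((List.range P).map (fun (k : Nat) => ((k : Int), pvCsum S k))) :=
        List.mem_map.mpr ⟨q, List.mem_range.mpr hqP, rfl⟩
      have hget : (PySem.Dict.mk ((List.range P).map (fun (k : Nat) => ((k : Int), pvCsum S k)))).getD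
          ((q : Nat) : Int) 0 = pvCsum S q :=
        PySem.Dict.getD_of_mem_items _ hmem hndk 0
      have hcont : (PySem.Dict.mk ((List.range P).map (fun (k : Nat) => ((k : Int), pvCsum S k)))).contains
          ((q : Nat) : Int) = true := by
        rw [PySem.Dict.contains_iff_mem_keys]
        simp only [PySem.Dict.keys, List.map_map]
        exact List.mem_map.mpr ⟨q, List.mem_range.mpr hqP, rfl⟩
      rw [PySem.Dict.modify, hkey, hget]
      apply PySem.Dict.ext
      rw [PySem.Dict.items_insert_of_contains _ _ hcont]
      simp only [List.map_map]
      refine List.map_congr_left (fun k hk => ?_)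
      have hkP : k < P := List.mem_range.mp hk
      simp only [Function.comp]
      by_cases hkq : k = q
      · rw [hkq, if_pos (by simp), pvCsum_append_eq S m q (by omega) (by omega)]
      · have hne : ¬ (((k : Nat) : Int) == ((q : Nat) : Int)) = true := by
          simp only [beq_iff_eq, Int.natCast_inj]; exact hkq
        rw [if_neg hne]
        rcases Nat.lt_or_ge k q with hlt | hge
        · rw [pvCsum_append_lt S m k (by omega)]
        · have hgt : q < k := lt_of_le_of_ne hge (Ne.symm hkq)
          rw [pvCsum_append_gt S m k (by omega)]

-- ===== VERDICT (by name: the statement is the Claim_ definition above) =====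
theorem get_part_costs_spec : Claim_equal_get_part_costs := by
  intro minerals picks _ _
  unfold Spec_get_part_costs get_part_costs get_part_costs_alt
  set L : Nat := minerals.length with hL
  set P : Nat := (L + 4) / 5 with hP
  set S : List String := PySem.List.slice minerals none (some (picks.sum * 5)) with hSdef
  have hSlen : S.length ≤ 5 * P := by
    have h1 : S.length ≤ L := by rw [hSdef, hL]; exact pvSlice_length_le _ _ _
    omega
  have hA : (if PySem.Int.mod (L : Int) 5 = 0 then PySem.Int.floordiv (L : Int) 5
      else PySem.Int.floordiv (L : Int) 5 + 1) = ((P : Nat) : Int) := by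
    rw [PySem.Int.mod_eq_emod_of_pos (show (0:Int) < 5 by norm_num), PySem.Int.floordiv_eq_ediv_of_pos (show (0:Int) < 5 by norm_num)]
    split_ifs with h <;> omega
  have hB : -(PySem.Int.floordiv (-((L : Nat) : Int)) 5) = ((P : Nat) : Int) := by
    rw [PySem.Int.floordiv_eq_ediv_of_pos (show (0:Int) < 5 by norm_num)]
    omega
  simp only [hA, hB]
  rw [pvFoldA P S hSlen]
  rw [PySem.Dict.items_foldl_insert_fresh _ (fun i => i) _ _
        (by intro a _; simp [PySem.Dict.contains_empty])
        (by simpa using PySem.List.nodup_pyRange_one 0 ((P : Nat) : Int))]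
  rw [PySem.List.pyRange_zero_natCast]
  simp only [List.map_map]
  refine List.map_congr_left (fun k _ => ?_)
  have h5k : (5 : Int) * (k : Int) = ((5 * k : Nat) : Int) := by push_cast; ring
  have h5k5 : (5 : Int) * (k : Int) + 5 = ((5 * k : Nat) : Int) + ((5 : Nat) : Int) := by push_cast; ring
  simp only [Function.comp]
  rw [h5k5, h5k, PySem.List.slice_natCast_add]
  rfl
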